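-- pv_equiv track=rewrite | github.com/Mirage995/shard-v1 | backend/strategy_memory.py | _filter_by_protocol
-- ===== SOURCE A (Python) =====
-- from typing import Dict, List, Optional
--
-- def _filter_by_protocol(strategies: List[Dict], query_protocol: str) -> List[Dict]:
--     """Hard-filter strategies by protocol, with controlled fallback.
--
--     Priority:
--       1. Same protocol (e.g. UDP query → UDP strategies)
--       2. ANY (protocol-agnostic strategies)
--       3. Full list (fallback if nothing else matches — preserves recall)
--     """
--     if query_protocol == "ANY":
--         return strategies  # no constraint — return all
--     same = [s for s in strategies if s.get("protocol", "ANY") == query_protocol]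
--     if same:
--         return same
--     any_ok = [s for s in strategies if s.get("protocol", "ANY") == "ANY"]
--     return any_ok if any_ok else strategies
-- ===== SOURCE B (Python) =====
-- from typing import Dict, List
--
-- def _filter_by_protocol(strategies: List[Dict], query_protocol: str) -> List[Dict]:
--     if query_protocol == "ANY":
--         return strategies
--     def rank(s):
--         p = s.get("protocol", "ANY")
--         return 0 if p == query_protocol else (1 if p == "ANY" else 2)
--     best = min(map(rank, strategies), default=2)
--     if best == 2:
--         return strategies
--     return [s for s in strategies if rank(s) == best]
-- ===== Notes on version B (the rewrite author's own statement) =====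
-- stated objective: alternative
-- what changed: Recasts the staged try-exact-then-try-wildcard filtering as a select-by-best-key algorithm: each strategy gets a numeric priority rank (0 exact match, 1 ANY, 2 other), the minimum rank is computed, and the result is the strategies attaining that minimum (or the full list when the minimum is 2).
import Mathlib
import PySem

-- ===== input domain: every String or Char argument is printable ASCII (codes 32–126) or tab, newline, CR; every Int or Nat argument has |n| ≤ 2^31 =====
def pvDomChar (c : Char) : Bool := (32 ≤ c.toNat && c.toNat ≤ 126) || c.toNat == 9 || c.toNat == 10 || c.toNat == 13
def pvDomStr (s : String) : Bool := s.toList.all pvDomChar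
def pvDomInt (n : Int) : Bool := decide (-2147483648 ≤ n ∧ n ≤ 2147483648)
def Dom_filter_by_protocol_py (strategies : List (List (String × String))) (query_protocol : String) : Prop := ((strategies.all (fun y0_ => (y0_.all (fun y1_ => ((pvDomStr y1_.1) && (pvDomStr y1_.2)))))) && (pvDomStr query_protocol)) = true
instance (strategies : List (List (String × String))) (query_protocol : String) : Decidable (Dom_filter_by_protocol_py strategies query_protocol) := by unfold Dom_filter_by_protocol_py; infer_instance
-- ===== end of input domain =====

-- B recasts A's staged exact-then-wildcard scans as a select-by-best-key algorithm (min priority rank, then select); alternative decomposition, same cost.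


-- ===== PORT A =====
-- s.get("protocol", "ANY") on the association list (first match, default "ANY")
def pvGetProto (s : List (String × String)) : String :=
  match s.find? (fun kv => kv.1 == "protocol") with
  | some kv => kv.2
  | none => "ANY"

def filter_by_protocol_py (strategies : List (List (String × String))) (query_protocol : String) : List (List (String × String)) :=
  if query_protocol == "ANY" then strategies
  else
    let same := strategies.filter (fun s => pvGetProto s == query_protocol)
    if !same.isEmpty then same
    else
      let any_ok := strategies.filter (fun s => pvGetProto s == "ANY")
      if !any_ok.isEmpty then any_ok else strategies

-- ===== PORT B =====
-- priority rank of a strategy: 0 exact match, 1 protocol-agnostic, 2 other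
def pvRank (q : String) (s : List (String × String)) : Nat :=
  if pvGetProto s == q then 0 else if pvGetProto s == "ANY" then 1 else 2

-- min(map(rank, strategies), default=2): since every rank ≤ 2, fold min starting from 2
def filter_by_protocol_py_alt (strategies : List (List (String × String))) (query_protocol : String) : List (List (String × String)) :=
  if query_protocol == "ANY" then strategies
  else
    let best := (strategies.map (pvRank query_protocol)).foldl min 2
    if best == 2 then strategies
    else strategies.filter (fun s => pvRank query_protocol s == best)

-- ===== PRECONDITION & SPEC =====
def Spec_filter_by_protocol_py (strategies : List (List (String × String))) (query_protocol : String) (out : List (List (String × String))) : Prop := out = filter_by_protocol_py_alt strategies query_protocol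
instance (strategies : List (List (String × String))) (query_protocol : String) (out : List (List (String × String))) : Decidable (Spec_filter_by_protocol_py strategies query_protocol out) := by unfold Spec_filter_by_protocol_py; infer_instance

-- ===== CLAIM (what is proved, stated in full; the proofs are below) =====
def Claim_equal_filter_by_protocol_py : Prop := ∀ (strategies : List (List (String × String))) (query_protocol : String), Dom_filter_by_protocol_py strategies query_protocol → Spec_filter_by_protocol_py strategies query_protocol (filter_by_protocol_py strategies query_protocol)

-- ===== LEMMAS AND PROOFS =====
-- characterisation of B's fold: min over ranks (with 2 for the empty list)
theorem pv_fold_min_char (q : String) :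
    ∀ (l : List (List (String × String))) (a : Nat), a ≤ 2 →
      (l.map (pvRank q)).foldl min a
        = min a (if l.any (fun s => pvRank q s == 0) then 0
                 else if l.any (fun s => pvRank q s == 1) then 1 else 2) := by
  intro l
  induction l with
  | nil => intro a ha; simp; omega
  | cons s t ih =>
    intro a ha
    have hr : pvRank q s ≤ 2 := by unfold pvRank; split_ifs <;> omega
    rw [List.map_cons, List.foldl_cons, ih _ (le_trans (min_le_right a _) hr)]
    simp only [List.any_cons]
    have h3 : pvRank q s = 0 ∨ pvRank q s = 1 ∨ pvRank q s = 2 := by omega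
    by_cases ht0 : (t.any fun s => pvRank q s == 0) = true <;>
      by_cases ht1 : (t.any fun s => pvRank q s == 1) = true <;>
        (rcases h3 with h | h | h <;> simp only [h, ht0, ht1] <;> simp)

-- ===== VERDICT (by name: the statement is the Claim_ definition above) =====
theorem filter_by_protocol_py_spec : Claim_equal_filter_by_protocol_py := by
  intro strategies q _
  unfold Spec_filter_by_protocol_py filter_by_protocol_py filter_by_protocol_py_alt
  by_cases hq : q = "ANY"
  · simp [hq]
  · have hb : (q == "ANY") = false := by simp [hq]
    simp only [hb, Bool.false_eq_true, if_false]
    rw [pv_fold_min_char q strategies 2 (le_refl 2)]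
    have e0 : ∀ s, (pvRank q s == 0) = (pvGetProto s == q) := by
      intro s; unfold pvRank; split_ifs with h h' <;> simp_all
    have e1 : ∀ s, (pvRank q s == 1) = (pvGetProto s == "ANY") := by
      intro s; unfold pvRank; split_ifs with h h' <;> simp_all
    by_cases hs0 : strategies.any (fun s => pvRank q s == 0) = true
    · have hne : ¬ (strategies.filter (fun s => pvGetProto s == q)).isEmpty = true := by
        simp only [List.any_eq_true, e0] at hs0
        simp only [List.isEmpty_iff, List.filter_eq_nil_iff]
        intro hh
        obtain ⟨x, hx, hpx⟩ := hs0
        exact hh x hx (by simpa using hpx)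
      simp only [hs0, if_true]
      simp [hne, List.filter_congr (fun s _ => (e0 s))]
    · have hsame : (strategies.filter (fun s => pvGetProto s == q)).isEmpty = true := by
        simp only [List.any_eq_true, e0] at hs0
        simp only [List.isEmpty_iff, List.filter_eq_nil_iff]
        intro x hx
        by_contra hc
        exact hs0 ⟨x, hx, by simpa using hc⟩
      simp only [hs0, if_false, hsame, Bool.not_true, Bool.false_eq_true]
      by_cases hs1 : strategies.any (fun s => pvRank q s == 1) = true
      · have hne1 : ¬ (strategies.filter (fun s => pvGetProto s == "ANY")).isEmpty = true := by
          simp only [List.any_eq_true, e1] at hs1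
          simp only [List.isEmpty_iff, List.filter_eq_nil_iff]
          intro hh
          obtain ⟨x, hx, hpx⟩ := hs1
          exact hh x hx (by simpa using hpx)
        simp [hs1, hne1, List.filter_congr (fun s _ => (e1 s))]
      · have hany : (strategies.filter (fun s => pvGetProto s == "ANY")).isEmpty = true := by
          simp only [List.any_eq_true, e1] at hs1
          simp only [List.isEmpty_iff, List.filter_eq_nil_iff]
          intro x hx
          by_contra hc
          exact hs1 ⟨x, hx, by simpa using hc⟩
        simp [hs1, hany]
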